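-- pv_equiv track=rewrite | github.com/RonaTinoTe1/plugvault | scripts/scan-github.py | detect_plugin_type
-- ===== SOURCE A (Python) =====
-- def detect_plugin_type(owner: str, repo: str, contents: list | None) -> str:
--     """Detect the type of plugin based on repository structure."""
--     if not contents:
--         return "unknown"
--
--     files = {item.get("name", "").lower() for item in contents if isinstance(item, dict)}
--     dirs = {item.get("name", "").lower() for item in contents if isinstance(item, dict) and item.get("type") == "dir"}
--
--     has_plugin_json = "plugin.json" in files
--     has_claude_plugin_dir = ".claude-plugin" in dirs
--     has_mcp = any("mcp" in f for f in files) or any("mcp" in d for d in dirs)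
--     has_hooks = "hooks" in dirs or any("hook" in f for f in files)
--     has_skills = "skills" in dirs or any("skill" in f for f in files)
--
--     types = []
--     if has_plugin_json or has_claude_plugin_dir or has_skills:
--         types.append("plugin")
--     if has_mcp:
--         types.append("mcp")
--     if has_hooks:
--         types.append("hooks")
--
--     if len(types) > 1:
--         return "mixed"
--     elif types:
--         return types[0]
--     return "unknown"
-- ===== SOURCE B (Python) =====
-- def detect_plugin_type(owner: str, repo: str, contents: list | None) -> str:
--     """Detect the type of plugin based on repository structure (single pass)."""
--     if not contents:
--         return "unknown"
--
--     plugin = mcp = hooks = skills = False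
--     for item in contents:
--         if not isinstance(item, dict):
--             continue
--         name = item.get("name", "").lower()
--         if name == "plugin.json" or (item.get("type") == "dir" and name == ".claude-plugin"):
--             plugin = True
--         if "mcp" in name:
--             mcp = True
--         if "hook" in name:
--             hooks = True
--         if "skill" in name:
--             skills = True
--
--     plugin = plugin or skills
--     if (plugin + mcp + hooks) > 1:
--         return "mixed"
--     if plugin:
--         return "plugin"
--     if mcp:
--         return "mcp"
--     if hooks:
--         return "hooks"
--     return "unknown"
-- ===== Notes on version B (the rewrite author's own statement) =====
-- stated objective: simpler
-- what changed: Replaces the two set comprehensions plus five separate membership/any scans with one pass over contents that maintains four boolean flags (the redundant dirs-side checks collapse because a dir named 'hooks'/'skills' already contains the substring and dir names are a subset of all names), keeping the same mixed/unknown logic.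
import Mathlib
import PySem

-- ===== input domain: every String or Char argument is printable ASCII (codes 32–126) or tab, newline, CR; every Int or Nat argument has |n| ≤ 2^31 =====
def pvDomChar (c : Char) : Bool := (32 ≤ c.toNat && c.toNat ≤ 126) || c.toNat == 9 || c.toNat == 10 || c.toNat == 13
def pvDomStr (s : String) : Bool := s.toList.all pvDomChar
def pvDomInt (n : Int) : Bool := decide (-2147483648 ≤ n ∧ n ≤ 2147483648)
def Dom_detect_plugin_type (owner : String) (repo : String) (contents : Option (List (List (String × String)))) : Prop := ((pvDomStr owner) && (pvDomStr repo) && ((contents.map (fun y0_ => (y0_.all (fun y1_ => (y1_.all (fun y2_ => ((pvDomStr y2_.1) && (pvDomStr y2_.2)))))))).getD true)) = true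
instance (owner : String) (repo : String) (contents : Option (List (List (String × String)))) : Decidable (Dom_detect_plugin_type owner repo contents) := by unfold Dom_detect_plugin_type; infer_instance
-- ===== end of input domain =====

-- B replaces A's two set comprehensions and five separate membership/any scans by a single
-- pass over contents maintaining four boolean flags (objective: simpler, same asymptotic cost).

-- ===== PORT A =====
-- item.get("name", "").lower()
def pvNameA (item : List (String × String)) : String :=
  PySem.Str.lower ((PySem.Dict.mk item).getD "name" "")

-- item.get("type") == "dir"
def pvIsDirA (item : List (String × String)) : Bool :=
  (PySem.Dict.mk item).get? "type" == some "dir"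

-- the types-list assembly and final mixed/unknown logic of A, on the three computed flags
def pvAssembleA (plugin mcp hooks : Bool) : String :=
  let types : List String := []
  let types := if plugin then types ++ ["plugin"] else types
  let types := if mcp then types ++ ["mcp"] else types
  let types := if hooks then types ++ ["hooks"] else types
  if types.length > 1 then "mixed"
  else if !types.isEmpty then types.headD ""
  else "unknown"

def detect_plugin_type (owner : String) (repo : String) (contents : Option (List (List (String × String)))) : String :=
  match contents with
  | none => "unknown"                               -- 'if not contents' (None)
  | some cs =>
    if cs.isEmpty then "unknown"                    -- 'if not contents' (empty list)
    else
      -- every item of the Lean model is a dict, so the isinstance filter keeps all items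
      let files : PySem.Set String := PySem.Set.ofList (cs.map pvNameA)
      let dirs : PySem.Set String := PySem.Set.ofList ((cs.filter pvIsDirA).map pvNameA)
      let has_plugin_json := PySem.Set.contains files "plugin.json"
      let has_claude_plugin_dir := PySem.Set.contains dirs ".claude-plugin"
      let has_mcp := files.any (fun f => PySem.Str.isIn "mcp" f) || dirs.any (fun d => PySem.Str.isIn "mcp" d)
      let has_hooks := PySem.Set.contains dirs "hooks" || files.any (fun f => PySem.Str.isIn "hook" f)
      let has_skills := PySem.Set.contains dirs "skills" || files.any (fun f => PySem.Str.isIn "skill" f)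
      pvAssembleA (has_plugin_json || has_claude_plugin_dir || has_skills) has_mcp has_hooks

-- ===== PORT B =====
-- one iteration of B's loop over the four flags (plugin, mcp, hooks, skills)
def pvStepB (st : Bool × Bool × Bool × Bool) (item : List (String × String)) : Bool × Bool × Bool × Bool :=
  let name := PySem.Str.lower ((PySem.Dict.mk item).getD "name" "")
  (st.1 || (name == "plugin.json" || ((PySem.Dict.mk item).get? "type" == some "dir" && name == ".claude-plugin")),
   st.2.1 || PySem.Str.isIn "mcp" name,
   st.2.2.1 || PySem.Str.isIn "hook" name,
   st.2.2.2 || PySem.Str.isIn "skill" name)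

def detect_plugin_type_alt (owner : String) (repo : String) (contents : Option (List (List (String × String)))) : String :=
  match contents with
  | none => "unknown"
  | some cs =>
    if cs.isEmpty then "unknown"
    else
      let st := cs.foldl pvStepB (false, false, false, false)
      let plugin := st.1 || st.2.2.2                -- plugin = plugin or skills
      if (if plugin then (1:Int) else 0) + (if st.2.1 then 1 else 0) + (if st.2.2.1 then 1 else 0) > 1 then "mixed"
      else if plugin then "plugin"
      else if st.2.1 then "mcp"
      else if st.2.2.1 then "hooks"
      else "unknown"

-- ===== PRECONDITION & SPEC =====
def Spec_detect_plugin_type (owner : String) (repo : String) (contents : Option (List (List (String × String)))) (out : String) : Prop := out = detect_plugin_type_alt owner repo contents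
instance (owner : String) (repo : String) (contents : Option (List (List (String × String)))) (out : String) : Decidable (Spec_detect_plugin_type owner repo contents out) := by unfold Spec_detect_plugin_type; infer_instance

-- ===== CLAIM (what is proved, stated in full; the proofs are below) =====
def Claim_equal_detect_plugin_type : Prop := ∀ (owner : String) (repo : String) (contents : Option (List (List (String × String)))), Dom_detect_plugin_type owner repo contents → Spec_detect_plugin_type owner repo contents (detect_plugin_type owner repo contents)

-- ===== LEMMAS AND PROOFS =====

-- B's per-item predicates
def pvPjB (item : List (String × String)) : Bool :=
  pvNameA item == "plugin.json" || (pvIsDirA item && pvNameA item == ".claude-plugin")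
def pvMcpB (item : List (String × String)) : Bool := PySem.Str.isIn "mcp" (pvNameA item)
def pvHookB (item : List (String × String)) : Bool := PySem.Str.isIn "hook" (pvNameA item)
def pvSkillB (item : List (String × String)) : Bool := PySem.Str.isIn "skill" (pvNameA item)

-- B's fold is four independent any-scans
theorem pvFoldB_spec (cs : List (List (String × String))) (a b c d : Bool) :
    cs.foldl pvStepB (a, b, c, d)
      = (a || cs.any pvPjB, b || cs.any pvMcpB, c || cs.any pvHookB, d || cs.any pvSkillB) := by
  induction cs generalizing a b c d with
  | nil => simp
  | cons h t ih =>
    simp only [List.foldl_cons, List.any_cons, pvStepB, ih]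
    simp [pvPjB, pvMcpB, pvHookB, pvSkillB, pvNameA, pvIsDirA, Bool.or_assoc]

-- any over a Python set of the mapped names is any over the list of items
theorem pv_any_ofList (l : List String) (p : String → Bool) :
    (PySem.Set.ofList l).any p = l.any p := by
  rw [Bool.eq_iff_iff]
  simp only [List.any_eq_true, PySem.Set.mem_ofList]

theorem pv_contains_eq_any (l : List String) (a : String) :
    l.contains a = l.any (fun x => x == a) := by
  rw [Bool.eq_iff_iff]
  simp only [List.contains_eq_mem, decide_eq_true_eq, List.any_eq_true, beq_iff_eq, exists_eq_right]

-- a disjunct that is pointwise subsumed by the other disappears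
theorem pv_any_sub {α : Type} (l : List α) (p₁ p₂ : α → Bool) (h : ∀ x, p₁ x = true → p₂ x = true) :
    (l.any p₁ || l.any p₂) = l.any p₂ := by
  cases h₂ : l.any p₂ with
  | true => simp
  | false =>
    simp only [Bool.or_false]
    simp only [List.any_eq_false] at h₂ ⊢
    exact fun x hx hp => h₂ x hx (h x hp)

theorem pv_any_or {α : Type} (l : List α) (p q : α → Bool) :
    l.any (fun x => p x || q x) = (l.any p || l.any q) := by
  induction l with
  | nil => rfl
  | cons h t ih => simp only [List.any_cons, ih, Bool.or_assoc, Bool.or_left_comm]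

-- the two tail computations agree on every flag combination
theorem pvAssemble_eq (P M H : Bool) :
    pvAssembleA P M H
      = (if (if P then (1:Int) else 0) + (if M then 1 else 0) + (if H then 1 else 0) > 1 then "mixed"
         else if P then "plugin" else if M then "mcp" else if H then "hooks" else "unknown") := by
  cases P <;> cases M <;> cases H <;> rfl

-- flag equalities
theorem pv_plugin_eq (cs : List (List (String × String))) :
    (PySem.Set.contains (PySem.Set.ofList (cs.map pvNameA)) "plugin.json"
      || PySem.Set.contains (PySem.Set.ofList ((cs.filter pvIsDirA).map pvNameA)) ".claude-plugin")
      = cs.any pvPjB := by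
  simp only [PySem.Set.contains_eq_listContains, pv_contains_eq_any, pv_any_ofList,
    List.any_map, List.any_filter, Function.comp_def]
  rw [← pv_any_or]
  rfl

theorem pv_dir_named_sub (cs : List (List (String × String))) (nm : String) (p : List (String × String) → Bool)
    (h : ∀ item, pvNameA item = nm → p item = true) :
    (cs.any (fun it => pvIsDirA it && (pvNameA it == nm)) || cs.any p) = cs.any p := by
  refine pv_any_sub cs _ p (fun x hx => ?_)
  have hnm : pvNameA x = nm := by
    rcases Bool.and_eq_true .. |>.mp hx with ⟨_, h2⟩
    exact beq_iff_eq.mp h2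
  exact h x hnm

-- ===== VERDICT (by name: the statement is the Claim_ definition above) =====
theorem detect_plugin_type_spec : Claim_equal_detect_plugin_type := by
  intro owner repo contents _
  unfold Spec_detect_plugin_type detect_plugin_type detect_plugin_type_alt
  cases contents with
  | none => rfl
  | some cs =>
    by_cases he : cs.isEmpty
    · simp [he]
    · simp only [he, pvFoldB_spec, Bool.false_or]
      rw [← pvAssemble_eq]
      -- has_mcp: the dirs scan is subsumed by the files scan
      have hmcp : ((PySem.Set.ofList (cs.map pvNameA)).any (fun f => PySem.Str.isIn "mcp" f)
          || (PySem.Set.ofList ((cs.filter pvIsDirA).map pvNameA)).any (fun d => PySem.Str.isIn "mcp" d))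
          = cs.any pvMcpB := by
        simp only [pv_any_ofList, List.any_map, Function.comp_def, List.any_filter]
        rw [Bool.or_comm]
        exact pv_any_sub cs _ _ (fun x hx => (Bool.and_eq_true .. |>.mp hx).2)
      -- has_hooks: a dir literally named "hooks" contains "hook"
      have hhooks : (PySem.Set.contains (PySem.Set.ofList ((cs.filter pvIsDirA).map pvNameA)) "hooks"
          || (PySem.Set.ofList (cs.map pvNameA)).any (fun f => PySem.Str.isIn "hook" f))
          = cs.any pvHookB := by
        simp only [PySem.Set.contains_eq_listContains, pv_contains_eq_any, pv_any_ofList,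
          List.any_map, Function.comp_def, List.any_filter]
        exact pv_dir_named_sub cs "hooks" pvHookB (fun item h => by
          simp only [pvHookB, h]; rfl)
      -- has_skills: a dir literally named "skills" contains "skill"
      have hskills : (PySem.Set.contains (PySem.Set.ofList ((cs.filter pvIsDirA).map pvNameA)) "skills"
          || (PySem.Set.ofList (cs.map pvNameA)).any (fun f => PySem.Str.isIn "skill" f))
          = cs.any pvSkillB := by
        simp only [PySem.Set.contains_eq_listContains, pv_contains_eq_any, pv_any_ofList,
          List.any_map, Function.comp_def, List.any_filter]
        exact pv_dir_named_sub cs "skills" pvSkillB (fun item h => by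
          simp only [pvSkillB, h]; rfl)
      have hpj := pv_plugin_eq cs
      simp only [pvAssembleA]
      rw [hmcp, hhooks, hskills]
      rw [show ∀ a b c : Bool, (a || b || c) = ((a || b) || c) from fun _ _ _ => rfl]
      rw [hpj]
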